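-- pv_equiv track=rewrite | github.com/uw-math-ai/PolyArithmeticCircuitsRL | Game-Board-Generation/interesting_polynomial_generator.py | collect_shortest_path_samples
-- ===== SOURCE A (Python) =====
-- import math
-- from typing import Any, Dict, Iterable, List, Optional, Sequence, Set, Tuple
--
-- def collect_shortest_path_samples(
--     node_id: str,
--     roots: Set[str],
--     predecessors: Dict[str, Set[str]],
--     limit: int,
--     order_hint: Dict[str, int],
-- ) -> List[List[str]]:
--     """Enumerate up to `limit` shortest paths ending at `node_id`."""
--     if limit <= 0:
--         return []
--
--     samples: List[List[str]] = []
--     path: List[str] = []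
--
--     def dfs(current: str) -> None:
--         if len(samples) >= limit:
--             return
--         path.append(current)
--         if current in roots or not predecessors[current]:
--             samples.append(list(reversed(path)))
--             path.pop()
--             return
--         next_nodes = sorted(
--             predecessors[current],
--             key=lambda nid: (order_hint.get(nid, math.inf), nid),
--         )
--         for nxt in next_nodes:
--             dfs(nxt)
--             if len(samples) >= limit:
--                 break
--         path.pop()
--
--     dfs(node_id)
--     return samples
-- ===== SOURCE B (Python) =====
-- import math
--
-- def collect_shortest_path_samples(node_id, roots, predecessors, limit, order_hint):
--     """Enumerate up to `limit` shortest paths ending at `node_id`."""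
--     if limit <= 0:
--         return []
--
--     def paths(current):
--         # lazily yield every root-to-`current` path, in the same sorted-predecessor order;
--         # a node with no predecessor entry is treated as a source (A raises KeyError there)
--         preds = () if current in roots else predecessors.get(current, ())
--         if not preds:
--             yield [current]
--             return
--         for nxt in sorted(preds, key=lambda nid: (order_hint.get(nid, math.inf), nid)):
--             for p in paths(nxt):
--                 yield p + [current]
--
--     samples = []
--     for p in paths(node_id):
--         samples.append(p)
--         if len(samples) >= limit:
--             break
--     return samples
-- ===== Notes on version B (the rewrite author's own statement) =====
-- stated objective: simpler
-- what changed: Replaces the stateful DFS (mutable samples/path lists with limit checks threaded through every call and a break in the loop) by a pure lazy generator that enumerates all root-to-node paths in the same order, truncated to the first `limit` paths; B also treats a node without a predecessor entry as a source (A raises KeyError there, outside Pre_).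
-- outside the precondition, e.g. on collect_shortest_path_samples('a', {'r'}, {'a': {'x', 'r'}}, 1, {}): A returns [['r', 'a']], B returns [['r', 'a']]
import Mathlib
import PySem

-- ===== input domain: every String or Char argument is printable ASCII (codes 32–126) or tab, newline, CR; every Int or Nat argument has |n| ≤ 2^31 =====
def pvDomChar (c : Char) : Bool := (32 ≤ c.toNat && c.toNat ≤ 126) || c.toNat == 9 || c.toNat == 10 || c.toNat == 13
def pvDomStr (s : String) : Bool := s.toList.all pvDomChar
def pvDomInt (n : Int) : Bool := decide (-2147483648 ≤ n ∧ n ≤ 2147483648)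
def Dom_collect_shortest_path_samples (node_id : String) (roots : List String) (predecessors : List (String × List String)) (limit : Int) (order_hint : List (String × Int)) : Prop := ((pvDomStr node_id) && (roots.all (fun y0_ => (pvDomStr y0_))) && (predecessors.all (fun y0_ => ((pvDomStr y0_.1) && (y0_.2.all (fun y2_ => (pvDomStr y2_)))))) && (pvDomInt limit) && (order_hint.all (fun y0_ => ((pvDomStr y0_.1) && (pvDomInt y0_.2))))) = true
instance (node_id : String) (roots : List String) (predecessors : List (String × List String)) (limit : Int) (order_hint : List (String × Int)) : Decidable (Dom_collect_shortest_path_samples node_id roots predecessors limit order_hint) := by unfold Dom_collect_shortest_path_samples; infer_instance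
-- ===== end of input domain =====

-- B replaces A's stateful DFS (mutable samples/path with limit checks threaded through every call
-- and a break in the loop) by a pure lazy generator of root-to-node paths, truncated to the first
-- `limit` — objective: simpler.

-- shared primitive helpers (both Pythons look keys up in the same dicts and sort with the same key)
-- predecessors[x] / predecessors.get(x, ()) / order_hint.get(x): Python dict built from the pairs
-- (later duplicate keys overwrite)
def pvPreds (predecessors : List (String × List String)) (x : String) : Option (List String) :=
  (PySem.Dict.ofList predecessors).get? x

-- sort key (order_hint.get(nid, math.inf), nid); math.inf is modelled by 2^32, exact on the
-- stated domain (|order_hint values| ≤ 2^31 < 2^32); ties are impossible (second component nid)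
def pvRank (order_hint : List (String × Int)) (nid : String) : Int :=
  ((PySem.Dict.ofList order_hint).get? nid).getD 4294967296

def pvSortedPreds (order_hint : List (String × Int)) (ps : List String) : List String :=
  PySem.List.sorted2 ps (pvRank order_hint) (fun nid => nid)

-- ===== PORT A =====
-- the inner `for nxt in next_nodes: dfs(nxt); if len(samples) >= limit: break` loop
def pvLoopA (dfs : String → List (List String) → List (List String)) (limit : Int) :
    List String → List (List String) → List (List String)
  | [], samples => samples
  | n :: ns, samples =>
    let s := dfs n samples
    if limit ≤ (s.length : Int) then s else pvLoopA dfs limit ns s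

-- the recursive dfs; `path` and `samples` are the mutable lists threaded through (path.pop =
-- returning to the caller's `path`); fuel only makes the recursion total — on inputs satisfying
-- Pre_ (acyclic, all needed keys present) the Python recursion depth never reaches it
def pvDfsA (roots : List String) (predecessors : List (String × List String)) (limit : Int)
    (order_hint : List (String × Int)) :
    Nat → String → List String → List (List String) → List (List String)
  | 0, _, _, samples => samples
  | f + 1, current, path, samples =>
    if limit ≤ (samples.length : Int) then samples
    else
      let path' := path ++ [current]
      if current ∈ roots ∨ (pvPreds predecessors current).getD [] = [] then
        samples ++ [path'.reverse]
      else
        pvLoopA (fun n s => pvDfsA roots predecessors limit order_hint f n path' s) limit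
          (pvSortedPreds order_hint ((pvPreds predecessors current).getD [])) samples

def collect_shortest_path_samples (node_id : String) (roots : List String) (predecessors : List (String × List String)) (limit : Int) (order_hint : List (String × Int)) : List (List String) :=
  if limit ≤ 0 then []
  else pvDfsA roots predecessors limit order_hint (predecessors.length + 1) node_id [] []

-- ===== PORT B =====
-- B's generator `paths(current)`, materialised eagerly (fuel as in A's port: totality only);
-- B's `predecessors.get(current, ())` is exactly (pvPreds …).getD []
def pvPathsB (roots : List String) (predecessors : List (String × List String))
    (order_hint : List (String × Int)) : Nat → String → List (List String)
  | 0, _ => []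
  | f + 1, current =>
    if current ∈ roots ∨ (pvPreds predecessors current).getD [] = [] then [[current]]
    else
      (pvSortedPreds order_hint ((pvPreds predecessors current).getD [])).flatMap
        (fun nxt => (pvPathsB roots predecessors order_hint f nxt).map (fun p => p ++ [current]))

def collect_shortest_path_samples_alt (node_id : String) (roots : List String) (predecessors : List (String × List String)) (limit : Int) (order_hint : List (String × Int)) : List (List String) :=
  if limit ≤ 0 then []
  else -- B's `for p in paths(node_id): append; break at limit` = first `limit` generated paths
    (pvPathsB roots predecessors order_hint (predecessors.length + 1) node_id).take limit.toNat

-- ===== PRECONDITION & SPEC =====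
-- graph plumbing for Pre_: successors A actually follows from x (none once a root is reached)
def pvSucc (roots : List String) (predecessors : List (String × List String)) (x : String) :
    List String :=
  if x ∈ roots then [] else (pvPreds predecessors x).getD []

def pvStep (roots : List String) (predecessors : List (String × List String))
    (S : List String) : List String :=
  PySem.Set.update S (S.flatMap (pvSucc roots predecessors))

def pvReach (roots : List String) (predecessors : List (String × List String))
    (start : List String) : List String :=
  (pvStep roots predecessors)^[predecessors.length + 1] start

-- Pre_ restricts to the function's natural domain, the shape a shortest-path predecessor map has
-- by construction: every node reachable from node_id is a root or a key of `predecessors`, and the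
-- reachable predecessor edges are acyclic. Outside it the map is malformed and A raises — KeyError
-- on a dangling reference, unbounded recursion (RecursionError) on a cycle — except when the limit
-- cut-off stops the traversal just before the malformed region: there A happens to return a
-- truncated list (possibly with repeated nodes, so not shortest paths), B returns the same list
-- (see the cites), but that termination is an accident of the cut-off, not specified behaviour on
-- a malformed map, so those inputs stay outside the claim.
def Pre_collect_shortest_path_samples (node_id : String) (roots : List String) (predecessors : List (String × List String)) (limit : Int) (order_hint : List (String × Int)) : Prop :=
  limit ≤ 0 ∨
    ((∀ y ∈ pvReach roots predecessors [node_id],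
        y ∈ roots ∨ y ∈ predecessors.map Prod.fst) ∧
     (∀ y ∈ pvReach roots predecessors [node_id],
        y ∉ pvReach roots predecessors (pvSucc roots predecessors y)))
instance (node_id : String) (roots : List String) (predecessors : List (String × List String)) (limit : Int) (order_hint : List (String × Int)) : Decidable (Pre_collect_shortest_path_samples node_id roots predecessors limit order_hint) := by unfold Pre_collect_shortest_path_samples; infer_instance

def pvWitness_collect_shortest_path_samples : String × List String × (List (String × List String)) × Int × (List (String × Int)) :=
  ("a", ["r"], [("a", ["r", "s"]), ("s", [])], 3, [("s", 1)])

def Spec_collect_shortest_path_samples (node_id : String) (roots : List String) (predecessors : List (String × List String)) (limit : Int) (order_hint : List (String × Int)) (out : List (List String)) : Prop := out = collect_shortest_path_samples_alt node_id roots predecessors limit order_hint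
instance (node_id : String) (roots : List String) (predecessors : List (String × List String)) (limit : Int) (order_hint : List (String × Int)) (out : List (List String)) : Decidable (Spec_collect_shortest_path_samples node_id roots predecessors limit order_hint out) := by unfold Spec_collect_shortest_path_samples; infer_instance

-- ===== CLAIM (what is proved, stated in full; the proofs are below) =====
def Claim_equal_collect_shortest_path_samples : Prop := ∀ (node_id : String) (roots : List String) (predecessors : List (String × List String)) (limit : Int) (order_hint : List (String × Int)), Dom_collect_shortest_path_samples node_id roots predecessors limit order_hint → Pre_collect_shortest_path_samples node_id roots predecessors limit order_hint → Spec_collect_shortest_path_samples node_id roots predecessors limit order_hint (collect_shortest_path_samples node_id roots predecessors limit order_hint)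

-- ===== LEMMAS AND PROOFS =====

-- the inner loop accumulates, truncated at `limit`, the paths of the successive children
theorem pvLoopA_inv (roots : List String) (predecessors : List (String × List String))
    (limit : Int) (order_hint : List (String × Int)) (f : Nat) (path' : List String)
    (IH : ∀ (cur : String) (samples : List (List String)),
      (samples.length : Int) ≤ limit →
      pvDfsA roots predecessors limit order_hint f cur path' samples =
        (samples ++ (pvPathsB roots predecessors order_hint f cur).map
          (fun p => p ++ path'.reverse)).take limit.toNat) :
    ∀ (ns : List String) (samples : List (List String)),
      (samples.length : Int) ≤ limit →
      pvLoopA (fun n s => pvDfsA roots predecessors limit order_hint f n path' s) limit ns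
          samples =
        (samples ++ ns.flatMap (fun n => (pvPathsB roots predecessors order_hint f n).map
          (fun p => p ++ path'.reverse))).take limit.toNat := by
  intro ns
  induction ns with
  | nil =>
    intro samples h
    have hlen : samples.length ≤ limit.toNat := by omega
    simp [pvLoopA, List.take_of_length_le hlen]
  | cons n ns ih =>
    intro samples h
    have hstep := IH n samples h
    simp only [pvLoopA, hstep]
    set T := samples ++ (pvPathsB roots predecessors order_hint f n).map
      (fun p => p ++ path'.reverse) with hT
    by_cases hge : limit ≤ ((T.take limit.toNat).length : Int)
    · -- limit reached after this child: the `break` fires; remaining children contribute nothing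
      simp only [if_pos hge]
      have hlim : limit.toNat ≤ T.length := by
        simp only [List.length_take] at hge; omega
      rw [List.flatMap_cons, ← List.append_assoc, ← hT,
        List.take_append_of_le_length hlim]
    · simp only [if_neg hge]
      have hTlt : T.length < limit.toNat := by
        simp only [List.length_take] at hge; omega
      have hTeq : T.take limit.toNat = T := List.take_of_length_le (le_of_lt hTlt)
      rw [hTeq, ih T (by omega), hT, List.flatMap_cons, List.append_assoc]

-- main invariant: A's dfs extends `samples` with B's paths (suffixed by the reversed current
-- path), truncated at `limit`
theorem pvDfsA_inv (roots : List String) (predecessors : List (String × List String))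
    (limit : Int) (order_hint : List (String × Int)) :
    ∀ (f : Nat) (cur : String) (path : List String) (samples : List (List String)),
      (samples.length : Int) ≤ limit →
      pvDfsA roots predecessors limit order_hint f cur path samples =
        (samples ++ (pvPathsB roots predecessors order_hint f cur).map
          (fun p => p ++ path.reverse)).take limit.toNat := by
  intro f
  induction f with
  | zero =>
    intro cur path samples h
    have hlen : samples.length ≤ limit.toNat := by omega
    simp [pvDfsA, pvPathsB, List.take_of_length_le hlen]
  | succ f ihf =>
    intro cur path samples h
    by_cases hfull : limit ≤ (samples.length : Int)
    · -- len(samples) >= limit: dfs returns at once and the truncation keeps exactly `samples`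
      have hlen : limit.toNat = samples.length := by omega
      simp only [pvDfsA, if_pos hfull, hlen]
      rw [List.take_append_of_le_length (le_refl _), List.take_of_length_le (le_refl _)]
    · simp only [pvDfsA, if_neg hfull]
      by_cases hterm : cur ∈ roots ∨ (pvPreds predecessors cur).getD [] = []
      · -- terminal node: one sample is appended, and it is below the limit
        simp only [if_pos hterm, pvPathsB, List.map_cons, List.map_nil,
          List.reverse_append, List.reverse_cons,
          List.reverse_nil, List.nil_append, List.cons_append]
        exact (List.take_of_length_le (by
          simp only [List.length_append, List.length_cons, List.length_nil]; omega)).symm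
      · simp only [if_neg hterm]
        rw [pvLoopA_inv roots predecessors limit order_hint f (path ++ [cur])
          (fun c s hs => ihf c (path ++ [cur]) s hs) _ samples h]
        simp only [pvPathsB, if_neg hterm, List.map_flatMap, List.map_map]
        refine congrArg (fun l => List.take limit.toNat (samples ++ l))
          (congrArg (fun g => List.flatMap g
            (pvSortedPreds order_hint ((pvPreds predecessors cur).getD []))) ?_)
        funext n
        simp [Function.comp, List.reverse_append, List.append_assoc]
-- ===== VERDICT (by name: the statement is the Claim_ definition above) =====
theorem collect_shortest_path_samples_spec : Claim_equal_collect_shortest_path_samples := by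
  intro node_id roots predecessors limit order_hint _ _
  unfold Spec_collect_shortest_path_samples
  unfold collect_shortest_path_samples collect_shortest_path_samples_alt
  by_cases hl : limit ≤ 0
  · simp [hl]
  · simp only [if_neg hl]
    rw [pvDfsA_inv roots predecessors limit order_hint (predecessors.length + 1) node_id [] []
      (by simp; omega)]
    simp
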